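-- pv_equiv track=rewrite | github.com/mrthomasvan-eng/multibox-planner | app/recommender.py | _flex_slot_indices
-- ===== SOURCE A (Python) =====
-- from typing import Dict, List, Optional, Tuple, Set, Any
--
-- def _flex_slot_indices(template_slots: List[str], hardcore_required: bool) -> List[int]:
--     """Indices of slots that can be forced to satisfy a constraint. Tank is never flexed; in hardcore only dps slots are."""
--     if hardcore_required:
--         # Hardcore: only dps slots are flex; tank, healer, slow, cc are core and must not be replaced
--         return [i for i, s in enumerate(template_slots) if s == "dps"]
--     # 3-box charm: Enchanter is tank (charm_tank); flex is dps first, then healer (e.g. meet SOW with Druid in slot 2, or force healer if needed)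
--     if template_slots == ["charm_tank", "healer", "dps"]:
--         return [2, 1]  # dps slot first, then healer
--     # Not hardcore: healer (e.g. Druid for ports), slow, cc, dps can flex; never tank
--     order = ["healer", "slow", "cc", "dps", "pet_partner", "charm_partner", "kite_partner_swarm", "kite_partner_fear_snare", "kite_partner", "support"]
--     non_flex = {"tank", "charm_tank"}  # charm_tank is filled by Enchanter when require_charm; don't force other constraints into it
--     indices: List[int] = []
--     for slot_name in order:
--         indices.extend([i for i, s in enumerate(template_slots) if s == slot_name])
--     indices.extend([i for i, s in enumerate(template_slots) if s not in order and s not in non_flex])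
--     return indices
-- ===== SOURCE B (Python) =====
-- def _flex_slot_indices(template_slots, hardcore_required):
--     """Indices of slots that can be forced to satisfy a constraint. Tank is never flexed; in hardcore only dps slots are."""
--     if hardcore_required:
--         return [i for i, s in enumerate(template_slots) if s == "dps"]
--     if template_slots == ["charm_tank", "healer", "dps"]:
--         return [2, 1]  # dps slot first, then healer
--     order = ["healer", "slow", "cc", "dps", "pet_partner", "charm_partner", "kite_partner_swarm", "kite_partner_fear_snare", "kite_partner", "support"]
--     rank = {name: r for r, name in enumerate(order)}
--     # Counting-sort style: one pass over the slots, dropping indices into priority buckets.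
--     buckets = [[] for _ in range(len(order) + 1)]
--     for i, s in enumerate(template_slots):
--         if s == "tank" or s == "charm_tank":
--             continue
--         buckets[rank.get(s, len(order))].append(i)
--     return [i for b in buckets for i in b]
-- ===== Notes on version B (the rewrite author's own statement) =====
-- stated objective: alternative
-- what changed: A scans the whole slot list once per priority name (ten passes) plus an extras pass; B makes a single pass over the slots, dropping each index into a priority bucket keyed by a rank dict (counting sort), then flattens the buckets.
import Mathlib
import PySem

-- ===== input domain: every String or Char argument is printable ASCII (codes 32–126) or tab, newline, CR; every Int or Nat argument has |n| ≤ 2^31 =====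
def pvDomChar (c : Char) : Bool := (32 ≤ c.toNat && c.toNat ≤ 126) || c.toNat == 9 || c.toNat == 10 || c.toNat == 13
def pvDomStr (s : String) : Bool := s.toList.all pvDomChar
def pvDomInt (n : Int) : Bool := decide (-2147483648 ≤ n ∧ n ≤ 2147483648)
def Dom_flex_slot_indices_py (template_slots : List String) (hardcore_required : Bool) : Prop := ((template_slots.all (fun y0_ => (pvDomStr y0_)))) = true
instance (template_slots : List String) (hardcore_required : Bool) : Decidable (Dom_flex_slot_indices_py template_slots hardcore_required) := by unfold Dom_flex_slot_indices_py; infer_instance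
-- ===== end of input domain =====

set_option maxHeartbeats 1000000

-- B replaces A's ten full scans of template_slots (one per priority name) plus an extras scan
-- by one single pass dropping each index into a priority bucket (counting sort), then flattening.

-- ===== PORT A =====
def pvOrder : List String := ["healer", "slow", "cc", "dps", "pet_partner", "charm_partner", "kite_partner_swarm", "kite_partner_fear_snare", "kite_partner", "support"]

-- [i for i, s in enumerate(template_slots) if s == name]
def pvMatches (template_slots : List String) (name : String) : List Int :=
  (PySem.List.enumerate template_slots 0).filterMap (fun p => if p.2 == name then some p.1 else none)

def flex_slot_indices_py (template_slots : List String) (hardcore_required : Bool) : List Int :=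
  if hardcore_required then
    pvMatches template_slots "dps"
  else if template_slots == ["charm_tank", "healer", "dps"] then [2, 1]
  else
    let non_flex : PySem.Set String := PySem.Set.ofList ["tank", "charm_tank"]
    let indices := pvOrder.foldl (fun acc slot_name => acc ++ pvMatches template_slots slot_name) []
    indices ++ (PySem.List.enumerate template_slots 0).filterMap
      (fun p => if !(pvOrder.contains p.2) && !(PySem.Set.contains non_flex p.2) then some p.1 else none)

-- ===== PORT B =====
def pvOrderB : List String := ["healer", "slow", "cc", "dps", "pet_partner", "charm_partner", "kite_partner_swarm", "kite_partner_fear_snare", "kite_partner", "support"]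

-- rank = {name: r for r, name in enumerate(order)}
def pvRank : PySem.Dict String Int :=
  (PySem.List.enumerate pvOrderB 0).foldl (fun d p => d.insert p.2 p.1) PySem.Dict.empty

def flex_slot_indices_py_alt (template_slots : List String) (hardcore_required : Bool) : List Int :=
  if hardcore_required then
    (PySem.List.enumerate template_slots 0).filterMap (fun p => if p.2 == "dps" then some p.1 else none)
  else if template_slots == ["charm_tank", "healer", "dps"] then [2, 1]
  else
    let buckets : List (List Int) := List.replicate (pvOrderB.length + 1) []
    let buckets := (PySem.List.enumerate template_slots 0).foldl
      (fun bs p =>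
        if p.2 == "tank" || p.2 == "charm_tank" then bs
        else
          -- buckets[rank.get(s, len(order))].append(i); the index is a rank 0..10, never negative,
          -- so .toNat is exact here
          bs.modify (PySem.Dict.getD pvRank p.2 (pvOrderB.length : Int)).toNat (fun b => b ++ [p.1]))
      buckets
    buckets.flatten

-- ===== PRECONDITION & SPEC =====
def Spec_flex_slot_indices_py (template_slots : List String) (hardcore_required : Bool) (out : List Int) : Prop := out = flex_slot_indices_py_alt template_slots hardcore_required
instance (template_slots : List String) (hardcore_required : Bool) (out : List Int) : Decidable (Spec_flex_slot_indices_py template_slots hardcore_required out) := by unfold Spec_flex_slot_indices_py; infer_instance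

-- ===== CLAIM (what is proved, stated in full; the proofs are below) =====
def Claim_equal_flex_slot_indices_py : Prop := ∀ (template_slots : List String) (hardcore_required : Bool), Dom_flex_slot_indices_py template_slots hardcore_required → Spec_flex_slot_indices_py template_slots hardcore_required (flex_slot_indices_py template_slots hardcore_required)

-- ===== LEMMAS AND PROOFS =====

-- classification of a slot name by B's step: none = skipped, some j = bucket j
def pvG (s : String) : Option Nat :=
  if s == "tank" || s == "charm_tank" then none
  else some (PySem.Dict.getD pvRank s (pvOrderB.length : Int)).toNat

-- indices of L whose name is classified into bucket j
def pvSel (j : Nat) (L : List (Int × String)) : List Int :=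
  L.filterMap (fun p => if pvG p.2 = some j then some p.1 else none)

lemma pvSel_cons (j : Nat) (p : Int × String) (L : List (Int × String)) :
    pvSel j (p :: L) = (if pvG p.2 = some j then [p.1] else []) ++ pvSel j L := by
  by_cases h : pvG p.2 = some j <;> simp [pvSel, List.filterMap_cons, h]

-- pvRank, evaluated once
lemma pvRank_items : pvRank.items = [("healer", (0 : Int)), ("slow", 1), ("cc", 2), ("dps", 3),
    ("pet_partner", 4), ("charm_partner", 5), ("kite_partner_swarm", 6),
    ("kite_partner_fear_snare", 7), ("kite_partner", 8), ("support", 9)] := by decide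

lemma pvUniq0 : ∀ s : String, pvG s = some 0 ↔ s = "healer" := by
  intro s
  constructor
  · intro h
    unfold pvG at h
    by_cases hb : (s == "tank" || s == "charm_tank") = true
    · rw [if_pos hb] at h; cases h
    rw [if_neg hb] at h
    have h' := Option.some.inj h
    cases hg : PySem.Dict.get? pvRank s with
    | none =>
      rw [PySem.Dict.getD_of_get?_eq_none _ _ hg,
        (show (pvOrderB.length : Int) = 10 from rfl)] at h'
      omega
    | some v =>
      have hmem := PySem.Dict.mem_items_of_get?_eq_some _ hg
      rw [pvRank_items] at hmem
      simp only [List.mem_cons, List.not_mem_nil, or_false, Prod.mk.injEq] at hmem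
      rcases hmem with hmem | hmem | hmem | hmem | hmem | hmem | hmem | hmem | hmem | hmem
      · exact hmem.1
      · rw [PySem.Dict.getD_of_get?_eq_some _ _ hg, hmem.2] at h'; omega
      · rw [PySem.Dict.getD_of_get?_eq_some _ _ hg, hmem.2] at h'; omega
      · rw [PySem.Dict.getD_of_get?_eq_some _ _ hg, hmem.2] at h'; omega
      · rw [PySem.Dict.getD_of_get?_eq_some _ _ hg, hmem.2] at h'; omega
      · rw [PySem.Dict.getD_of_get?_eq_some _ _ hg, hmem.2] at h'; omega
      · rw [PySem.Dict.getD_of_get?_eq_some _ _ hg, hmem.2] at h'; omega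
      · rw [PySem.Dict.getD_of_get?_eq_some _ _ hg, hmem.2] at h'; omega
      · rw [PySem.Dict.getD_of_get?_eq_some _ _ hg, hmem.2] at h'; omega
      · rw [PySem.Dict.getD_of_get?_eq_some _ _ hg, hmem.2] at h'; omega
  · intro h; subst h; decide

lemma pvUniq1 : ∀ s : String, pvG s = some 1 ↔ s = "slow" := by
  intro s
  constructor
  · intro h
    unfold pvG at h
    by_cases hb : (s == "tank" || s == "charm_tank") = true
    · rw [if_pos hb] at h; cases h
    rw [if_neg hb] at h
    have h' := Option.some.inj h
    cases hg : PySem.Dict.get? pvRank s with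
    | none =>
      rw [PySem.Dict.getD_of_get?_eq_none _ _ hg,
        (show (pvOrderB.length : Int) = 10 from rfl)] at h'
      omega
    | some v =>
      have hmem := PySem.Dict.mem_items_of_get?_eq_some _ hg
      rw [pvRank_items] at hmem
      simp only [List.mem_cons, List.not_mem_nil, or_false, Prod.mk.injEq] at hmem
      rcases hmem with hmem | hmem | hmem | hmem | hmem | hmem | hmem | hmem | hmem | hmem
      · rw [PySem.Dict.getD_of_get?_eq_some _ _ hg, hmem.2] at h'; omega
      · exact hmem.1
      · rw [PySem.Dict.getD_of_get?_eq_some _ _ hg, hmem.2] at h'; omega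
      · rw [PySem.Dict.getD_of_get?_eq_some _ _ hg, hmem.2] at h'; omega
      · rw [PySem.Dict.getD_of_get?_eq_some _ _ hg, hmem.2] at h'; omega
      · rw [PySem.Dict.getD_of_get?_eq_some _ _ hg, hmem.2] at h'; omega
      · rw [PySem.Dict.getD_of_get?_eq_some _ _ hg, hmem.2] at h'; omega
      · rw [PySem.Dict.getD_of_get?_eq_some _ _ hg, hmem.2] at h'; omega
      · rw [PySem.Dict.getD_of_get?_eq_some _ _ hg, hmem.2] at h'; omega
      · rw [PySem.Dict.getD_of_get?_eq_some _ _ hg, hmem.2] at h'; omega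
  · intro h; subst h; decide

lemma pvUniq2 : ∀ s : String, pvG s = some 2 ↔ s = "cc" := by
  intro s
  constructor
  · intro h
    unfold pvG at h
    by_cases hb : (s == "tank" || s == "charm_tank") = true
    · rw [if_pos hb] at h; cases h
    rw [if_neg hb] at h
    have h' := Option.some.inj h
    cases hg : PySem.Dict.get? pvRank s with
    | none =>
      rw [PySem.Dict.getD_of_get?_eq_none _ _ hg,
        (show (pvOrderB.length : Int) = 10 from rfl)] at h'
      omega
    | some v =>
      have hmem := PySem.Dict.mem_items_of_get?_eq_some _ hg
      rw [pvRank_items] at hmem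
      simp only [List.mem_cons, List.not_mem_nil, or_false, Prod.mk.injEq] at hmem
      rcases hmem with hmem | hmem | hmem | hmem | hmem | hmem | hmem | hmem | hmem | hmem
      · rw [PySem.Dict.getD_of_get?_eq_some _ _ hg, hmem.2] at h'; omega
      · rw [PySem.Dict.getD_of_get?_eq_some _ _ hg, hmem.2] at h'; omega
      · exact hmem.1
      · rw [PySem.Dict.getD_of_get?_eq_some _ _ hg, hmem.2] at h'; omega
      · rw [PySem.Dict.getD_of_get?_eq_some _ _ hg, hmem.2] at h'; omega
      · rw [PySem.Dict.getD_of_get?_eq_some _ _ hg, hmem.2] at h'; omega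
      · rw [PySem.Dict.getD_of_get?_eq_some _ _ hg, hmem.2] at h'; omega
      · rw [PySem.Dict.getD_of_get?_eq_some _ _ hg, hmem.2] at h'; omega
      · rw [PySem.Dict.getD_of_get?_eq_some _ _ hg, hmem.2] at h'; omega
      · rw [PySem.Dict.getD_of_get?_eq_some _ _ hg, hmem.2] at h'; omega
  · intro h; subst h; decide

lemma pvUniq3 : ∀ s : String, pvG s = some 3 ↔ s = "dps" := by
  intro s
  constructor
  · intro h
    unfold pvG at h
    by_cases hb : (s == "tank" || s == "charm_tank") = true
    · rw [if_pos hb] at h; cases h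
    rw [if_neg hb] at h
    have h' := Option.some.inj h
    cases hg : PySem.Dict.get? pvRank s with
    | none =>
      rw [PySem.Dict.getD_of_get?_eq_none _ _ hg,
        (show (pvOrderB.length : Int) = 10 from rfl)] at h'
      omega
    | some v =>
      have hmem := PySem.Dict.mem_items_of_get?_eq_some _ hg
      rw [pvRank_items] at hmem
      simp only [List.mem_cons, List.not_mem_nil, or_false, Prod.mk.injEq] at hmem
      rcases hmem with hmem | hmem | hmem | hmem | hmem | hmem | hmem | hmem | hmem | hmem
      · rw [PySem.Dict.getD_of_get?_eq_some _ _ hg, hmem.2] at h'; omega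
      · rw [PySem.Dict.getD_of_get?_eq_some _ _ hg, hmem.2] at h'; omega
      · rw [PySem.Dict.getD_of_get?_eq_some _ _ hg, hmem.2] at h'; omega
      · exact hmem.1
      · rw [PySem.Dict.getD_of_get?_eq_some _ _ hg, hmem.2] at h'; omega
      · rw [PySem.Dict.getD_of_get?_eq_some _ _ hg, hmem.2] at h'; omega
      · rw [PySem.Dict.getD_of_get?_eq_some _ _ hg, hmem.2] at h'; omega
      · rw [PySem.Dict.getD_of_get?_eq_some _ _ hg, hmem.2] at h'; omega
      · rw [PySem.Dict.getD_of_get?_eq_some _ _ hg, hmem.2] at h'; omega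
      · rw [PySem.Dict.getD_of_get?_eq_some _ _ hg, hmem.2] at h'; omega
  · intro h; subst h; decide

lemma pvUniq4 : ∀ s : String, pvG s = some 4 ↔ s = "pet_partner" := by
  intro s
  constructor
  · intro h
    unfold pvG at h
    by_cases hb : (s == "tank" || s == "charm_tank") = true
    · rw [if_pos hb] at h; cases h
    rw [if_neg hb] at h
    have h' := Option.some.inj h
    cases hg : PySem.Dict.get? pvRank s with
    | none =>
      rw [PySem.Dict.getD_of_get?_eq_none _ _ hg,
        (show (pvOrderB.length : Int) = 10 from rfl)] at h'
      omega
    | some v =>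
      have hmem := PySem.Dict.mem_items_of_get?_eq_some _ hg
      rw [pvRank_items] at hmem
      simp only [List.mem_cons, List.not_mem_nil, or_false, Prod.mk.injEq] at hmem
      rcases hmem with hmem | hmem | hmem | hmem | hmem | hmem | hmem | hmem | hmem | hmem
      · rw [PySem.Dict.getD_of_get?_eq_some _ _ hg, hmem.2] at h'; omega
      · rw [PySem.Dict.getD_of_get?_eq_some _ _ hg, hmem.2] at h'; omega
      · rw [PySem.Dict.getD_of_get?_eq_some _ _ hg, hmem.2] at h'; omega
      · rw [PySem.Dict.getD_of_get?_eq_some _ _ hg, hmem.2] at h'; omega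
      · exact hmem.1
      · rw [PySem.Dict.getD_of_get?_eq_some _ _ hg, hmem.2] at h'; omega
      · rw [PySem.Dict.getD_of_get?_eq_some _ _ hg, hmem.2] at h'; omega
      · rw [PySem.Dict.getD_of_get?_eq_some _ _ hg, hmem.2] at h'; omega
      · rw [PySem.Dict.getD_of_get?_eq_some _ _ hg, hmem.2] at h'; omega
      · rw [PySem.Dict.getD_of_get?_eq_some _ _ hg, hmem.2] at h'; omega
  · intro h; subst h; decide

lemma pvUniq5 : ∀ s : String, pvG s = some 5 ↔ s = "charm_partner" := by
  intro s
  constructor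
  · intro h
    unfold pvG at h
    by_cases hb : (s == "tank" || s == "charm_tank") = true
    · rw [if_pos hb] at h; cases h
    rw [if_neg hb] at h
    have h' := Option.some.inj h
    cases hg : PySem.Dict.get? pvRank s with
    | none =>
      rw [PySem.Dict.getD_of_get?_eq_none _ _ hg,
        (show (pvOrderB.length : Int) = 10 from rfl)] at h'
      omega
    | some v =>
      have hmem := PySem.Dict.mem_items_of_get?_eq_some _ hg
      rw [pvRank_items] at hmem
      simp only [List.mem_cons, List.not_mem_nil, or_false, Prod.mk.injEq] at hmem
      rcases hmem with hmem | hmem | hmem | hmem | hmem | hmem | hmem | hmem | hmem | hmem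
      · rw [PySem.Dict.getD_of_get?_eq_some _ _ hg, hmem.2] at h'; omega
      · rw [PySem.Dict.getD_of_get?_eq_some _ _ hg, hmem.2] at h'; omega
      · rw [PySem.Dict.getD_of_get?_eq_some _ _ hg, hmem.2] at h'; omega
      · rw [PySem.Dict.getD_of_get?_eq_some _ _ hg, hmem.2] at h'; omega
      · rw [PySem.Dict.getD_of_get?_eq_some _ _ hg, hmem.2] at h'; omega
      · exact hmem.1
      · rw [PySem.Dict.getD_of_get?_eq_some _ _ hg, hmem.2] at h'; omega
      · rw [PySem.Dict.getD_of_get?_eq_some _ _ hg, hmem.2] at h'; omega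
      · rw [PySem.Dict.getD_of_get?_eq_some _ _ hg, hmem.2] at h'; omega
      · rw [PySem.Dict.getD_of_get?_eq_some _ _ hg, hmem.2] at h'; omega
  · intro h; subst h; decide

lemma pvUniq6 : ∀ s : String, pvG s = some 6 ↔ s = "kite_partner_swarm" := by
  intro s
  constructor
  · intro h
    unfold pvG at h
    by_cases hb : (s == "tank" || s == "charm_tank") = true
    · rw [if_pos hb] at h; cases h
    rw [if_neg hb] at h
    have h' := Option.some.inj h
    cases hg : PySem.Dict.get? pvRank s with
    | none =>
      rw [PySem.Dict.getD_of_get?_eq_none _ _ hg,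
        (show (pvOrderB.length : Int) = 10 from rfl)] at h'
      omega
    | some v =>
      have hmem := PySem.Dict.mem_items_of_get?_eq_some _ hg
      rw [pvRank_items] at hmem
      simp only [List.mem_cons, List.not_mem_nil, or_false, Prod.mk.injEq] at hmem
      rcases hmem with hmem | hmem | hmem | hmem | hmem | hmem | hmem | hmem | hmem | hmem
      · rw [PySem.Dict.getD_of_get?_eq_some _ _ hg, hmem.2] at h'; omega
      · rw [PySem.Dict.getD_of_get?_eq_some _ _ hg, hmem.2] at h'; omega
      · rw [PySem.Dict.getD_of_get?_eq_some _ _ hg, hmem.2] at h'; omega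
      · rw [PySem.Dict.getD_of_get?_eq_some _ _ hg, hmem.2] at h'; omega
      · rw [PySem.Dict.getD_of_get?_eq_some _ _ hg, hmem.2] at h'; omega
      · rw [PySem.Dict.getD_of_get?_eq_some _ _ hg, hmem.2] at h'; omega
      · exact hmem.1
      · rw [PySem.Dict.getD_of_get?_eq_some _ _ hg, hmem.2] at h'; omega
      · rw [PySem.Dict.getD_of_get?_eq_some _ _ hg, hmem.2] at h'; omega
      · rw [PySem.Dict.getD_of_get?_eq_some _ _ hg, hmem.2] at h'; omega
  · intro h; subst h; decide

lemma pvUniq7 : ∀ s : String, pvG s = some 7 ↔ s = "kite_partner_fear_snare" := by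
  intro s
  constructor
  · intro h
    unfold pvG at h
    by_cases hb : (s == "tank" || s == "charm_tank") = true
    · rw [if_pos hb] at h; cases h
    rw [if_neg hb] at h
    have h' := Option.some.inj h
    cases hg : PySem.Dict.get? pvRank s with
    | none =>
      rw [PySem.Dict.getD_of_get?_eq_none _ _ hg,
        (show (pvOrderB.length : Int) = 10 from rfl)] at h'
      omega
    | some v =>
      have hmem := PySem.Dict.mem_items_of_get?_eq_some _ hg
      rw [pvRank_items] at hmem
      simp only [List.mem_cons, List.not_mem_nil, or_false, Prod.mk.injEq] at hmem
      rcases hmem with hmem | hmem | hmem | hmem | hmem | hmem | hmem | hmem | hmem | hmem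
      · rw [PySem.Dict.getD_of_get?_eq_some _ _ hg, hmem.2] at h'; omega
      · rw [PySem.Dict.getD_of_get?_eq_some _ _ hg, hmem.2] at h'; omega
      · rw [PySem.Dict.getD_of_get?_eq_some _ _ hg, hmem.2] at h'; omega
      · rw [PySem.Dict.getD_of_get?_eq_some _ _ hg, hmem.2] at h'; omega
      · rw [PySem.Dict.getD_of_get?_eq_some _ _ hg, hmem.2] at h'; omega
      · rw [PySem.Dict.getD_of_get?_eq_some _ _ hg, hmem.2] at h'; omega
      · rw [PySem.Dict.getD_of_get?_eq_some _ _ hg, hmem.2] at h'; omega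
      · exact hmem.1
      · rw [PySem.Dict.getD_of_get?_eq_some _ _ hg, hmem.2] at h'; omega
      · rw [PySem.Dict.getD_of_get?_eq_some _ _ hg, hmem.2] at h'; omega
  · intro h; subst h; decide

lemma pvUniq8 : ∀ s : String, pvG s = some 8 ↔ s = "kite_partner" := by
  intro s
  constructor
  · intro h
    unfold pvG at h
    by_cases hb : (s == "tank" || s == "charm_tank") = true
    · rw [if_pos hb] at h; cases h
    rw [if_neg hb] at h
    have h' := Option.some.inj h
    cases hg : PySem.Dict.get? pvRank s with
    | none =>
      rw [PySem.Dict.getD_of_get?_eq_none _ _ hg,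
        (show (pvOrderB.length : Int) = 10 from rfl)] at h'
      omega
    | some v =>
      have hmem := PySem.Dict.mem_items_of_get?_eq_some _ hg
      rw [pvRank_items] at hmem
      simp only [List.mem_cons, List.not_mem_nil, or_false, Prod.mk.injEq] at hmem
      rcases hmem with hmem | hmem | hmem | hmem | hmem | hmem | hmem | hmem | hmem | hmem
      · rw [PySem.Dict.getD_of_get?_eq_some _ _ hg, hmem.2] at h'; omega
      · rw [PySem.Dict.getD_of_get?_eq_some _ _ hg, hmem.2] at h'; omega
      · rw [PySem.Dict.getD_of_get?_eq_some _ _ hg, hmem.2] at h'; omega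
      · rw [PySem.Dict.getD_of_get?_eq_some _ _ hg, hmem.2] at h'; omega
      · rw [PySem.Dict.getD_of_get?_eq_some _ _ hg, hmem.2] at h'; omega
      · rw [PySem.Dict.getD_of_get?_eq_some _ _ hg, hmem.2] at h'; omega
      · rw [PySem.Dict.getD_of_get?_eq_some _ _ hg, hmem.2] at h'; omega
      · rw [PySem.Dict.getD_of_get?_eq_some _ _ hg, hmem.2] at h'; omega
      · exact hmem.1
      · rw [PySem.Dict.getD_of_get?_eq_some _ _ hg, hmem.2] at h'; omega
  · intro h; subst h; decide

lemma pvUniq9 : ∀ s : String, pvG s = some 9 ↔ s = "support" := by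
  intro s
  constructor
  · intro h
    unfold pvG at h
    by_cases hb : (s == "tank" || s == "charm_tank") = true
    · rw [if_pos hb] at h; cases h
    rw [if_neg hb] at h
    have h' := Option.some.inj h
    cases hg : PySem.Dict.get? pvRank s with
    | none =>
      rw [PySem.Dict.getD_of_get?_eq_none _ _ hg,
        (show (pvOrderB.length : Int) = 10 from rfl)] at h'
      omega
    | some v =>
      have hmem := PySem.Dict.mem_items_of_get?_eq_some _ hg
      rw [pvRank_items] at hmem
      simp only [List.mem_cons, List.not_mem_nil, or_false, Prod.mk.injEq] at hmem
      rcases hmem with hmem | hmem | hmem | hmem | hmem | hmem | hmem | hmem | hmem | hmem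
      · rw [PySem.Dict.getD_of_get?_eq_some _ _ hg, hmem.2] at h'; omega
      · rw [PySem.Dict.getD_of_get?_eq_some _ _ hg, hmem.2] at h'; omega
      · rw [PySem.Dict.getD_of_get?_eq_some _ _ hg, hmem.2] at h'; omega
      · rw [PySem.Dict.getD_of_get?_eq_some _ _ hg, hmem.2] at h'; omega
      · rw [PySem.Dict.getD_of_get?_eq_some _ _ hg, hmem.2] at h'; omega
      · rw [PySem.Dict.getD_of_get?_eq_some _ _ hg, hmem.2] at h'; omega
      · rw [PySem.Dict.getD_of_get?_eq_some _ _ hg, hmem.2] at h'; omega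
      · rw [PySem.Dict.getD_of_get?_eq_some _ _ hg, hmem.2] at h'; omega
      · rw [PySem.Dict.getD_of_get?_eq_some _ _ hg, hmem.2] at h'; omega
      · exact hmem.1
  · intro h; subst h; decide

-- B's bucket fold, characterised: each bucket j collects pvSel j of the processed pairs
lemma pv_fold_buckets (L : List (Int × String)) (bs : List (List Int)) :
    L.foldl
      (fun bs p =>
        if p.2 == "tank" || p.2 == "charm_tank" then bs
        else bs.modify (PySem.Dict.getD pvRank p.2 (pvOrderB.length : Int)).toNat (fun b => b ++ [p.1]))
      bs
    = bs.mapIdx (fun j b => b ++ pvSel j L) := by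
  induction L generalizing bs with
  | nil =>
    apply List.ext_getElem <;> simp [pvSel]
  | cons p L ih =>
    simp only [List.foldl_cons, ih]
    apply List.ext_getElem
    · by_cases h : (p.2 == "tank" || p.2 == "charm_tank") = true <;> simp [h]
    · intro j hj hj'
      by_cases h : (p.2 == "tank" || p.2 == "charm_tank") = true
      · have hg : pvG p.2 = none := by simp [pvG, h]
        simp [h, pvSel_cons, hg]
      · have hg : pvG p.2 = some (PySem.Dict.getD pvRank p.2 (pvOrderB.length : Int)).toNat := by
          simp [pvG, h]
        simp only [h, List.getElem_mapIdx, List.getElem_modify, pvSel_cons, hg]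
        by_cases hjr : (PySem.Dict.getD pvRank p.2 (pvOrderB.length : Int)).toNat = j
        · simp [hjr, List.append_assoc]
        · simp [hjr, Ne.symm hjr]

-- bucket j holds exactly the matches of order[j], for each of the ten names
lemma pvSel_eq_matches (ts : List String) (j : Nat) (name : String)
    (huniq : ∀ s : String, pvG s = some j ↔ s = name) :
    pvSel j (PySem.List.enumerate ts 0) = pvMatches ts name := by
  unfold pvSel pvMatches
  apply List.filterMap_congr
  intro p _
  by_cases h : p.2 = name
  · simp [h, (huniq name).mpr rfl]
  · have hng : ¬ pvG p.2 = some j := fun hh => h ((huniq p.2).mp hh)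
    simp [h, hng]

-- the overflow bucket holds exactly A's extras
lemma pvSel_ten (ts : List String) :
    pvSel 10 (PySem.List.enumerate ts 0)
    = (PySem.List.enumerate ts 0).filterMap
        (fun p => if !(pvOrder.contains p.2) && !(PySem.Set.contains (PySem.Set.ofList ["tank", "charm_tank"]) p.2) then some p.1 else none) := by
  unfold pvSel
  apply List.filterMap_congr
  intro p _
  by_cases h0 : p.2 = "healer"; · rw [h0]; exact if_congr (by decide) rfl rfl
  by_cases h1 : p.2 = "slow"; · rw [h1]; exact if_congr (by decide) rfl rfl
  by_cases h2 : p.2 = "cc"; · rw [h2]; exact if_congr (by decide) rfl rfl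
  by_cases h3 : p.2 = "dps"; · rw [h3]; exact if_congr (by decide) rfl rfl
  by_cases h4 : p.2 = "pet_partner"; · rw [h4]; exact if_congr (by decide) rfl rfl
  by_cases h5 : p.2 = "charm_partner"; · rw [h5]; exact if_congr (by decide) rfl rfl
  by_cases h6 : p.2 = "kite_partner_swarm"; · rw [h6]; exact if_congr (by decide) rfl rfl
  by_cases h7 : p.2 = "kite_partner_fear_snare"; · rw [h7]; exact if_congr (by decide) rfl rfl
  by_cases h8 : p.2 = "kite_partner"; · rw [h8]; exact if_congr (by decide) rfl rfl
  by_cases h9 : p.2 = "support"; · rw [h9]; exact if_congr (by decide) rfl rfl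
  by_cases h10 : p.2 = "tank"; · rw [h10]; exact if_congr (by decide) rfl rfl
  by_cases h11 : p.2 = "charm_tank"; · rw [h11]; exact if_congr (by decide) rfl rfl
  have hget : PySem.Dict.get? pvRank p.2 = none := by
    cases hg : PySem.Dict.get? pvRank p.2 with
    | none => rfl
    | some v =>
      exfalso
      have hmem := PySem.Dict.mem_items_of_get?_eq_some _ hg
      rw [pvRank_items] at hmem
      simp only [List.mem_cons, List.not_mem_nil, or_false, Prod.mk.injEq] at hmem
      rcases hmem with hmem | hmem | hmem | hmem | hmem | hmem | hmem | hmem | hmem | hmem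
      · exact h0 hmem.1
      · exact h1 hmem.1
      · exact h2 hmem.1
      · exact h3 hmem.1
      · exact h4 hmem.1
      · exact h5 hmem.1
      · exact h6 hmem.1
      · exact h7 hmem.1
      · exact h8 hmem.1
      · exact h9 hmem.1
  have hcond : pvG p.2 = some 10 := by
    unfold pvG
    rw [if_neg (by simp [h10, h11]), PySem.Dict.getD_of_get?_eq_none _ _ hget]
    rfl
  have hcond2 : (!(pvOrder.contains p.2) && !(PySem.Set.contains (PySem.Set.ofList ["tank", "charm_tank"]) p.2)) = true := by
    simp [pvOrder, PySem.Set.contains, PySem.Set.ofList, h0, h1, h2, h3, h4, h5, h6, h7, h8, h9, h10, h11]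
  rw [hcond, if_pos rfl, if_pos hcond2]

-- ===== VERDICT (by name: the statement is the Claim_ definition above) =====
theorem flex_slot_indices_py_spec : Claim_equal_flex_slot_indices_py := by
  intro ts hc _
  unfold Spec_flex_slot_indices_py flex_slot_indices_py flex_slot_indices_py_alt
  cases hc with
  | true => simp [pvMatches]
  | false =>
    simp only [Bool.false_eq_true, if_false]
    by_cases hts : (ts == ["charm_tank", "healer", "dps"]) = true
    · simp [hts]
    · simp only [hts, if_false]
      rw [pv_fold_buckets]
      have h0 := pvSel_eq_matches ts 0 "healer" pvUniq0
      have h1 := pvSel_eq_matches ts 1 "slow" pvUniq1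
      have h2 := pvSel_eq_matches ts 2 "cc" pvUniq2
      have h3 := pvSel_eq_matches ts 3 "dps" pvUniq3
      have h4 := pvSel_eq_matches ts 4 "pet_partner" pvUniq4
      have h5 := pvSel_eq_matches ts 5 "charm_partner" pvUniq5
      have h6 := pvSel_eq_matches ts 6 "kite_partner_swarm" pvUniq6
      have h7 := pvSel_eq_matches ts 7 "kite_partner_fear_snare" pvUniq7
      have h8 := pvSel_eq_matches ts 8 "kite_partner" pvUniq8
      have h9 := pvSel_eq_matches ts 9 "support" pvUniq9
      have h10 := pvSel_ten ts
      simp only [pvOrderB, List.length_cons, List.length_nil]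
      simp only [List.replicate, List.mapIdx_cons, List.mapIdx_nil]
      simp [pvOrder, List.flatten, List.append_assoc, h0, h1, h2, h3, h4, h5, h6, h7, h8, h9, h10]
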